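-- pv_equiv track=rewrite | github.com/saorsa-labs/four-word-networking | identify_replacement_words.py | find_conflict_groups
-- ===== SOURCE A (Python) =====
-- from collections import defaultdict
--
-- def find_conflict_groups(words, max_prefix_length=5):
--     """Find groups of words that conflict within the given prefix length."""
--     prefix_to_words = defaultdict(list)
--
--     for word in words:
--         prefix = word[:max_prefix_length]
--         prefix_to_words[prefix].append(word)
--
--     # Return only groups with conflicts (more than one word)
--     conflict_groups = {
--         prefix: word_list
--         for prefix, word_list in prefix_to_words.items()
--         if len(word_list) > 1
--     }
--
--     return conflict_groups
-- ===== SOURCE B (Python) =====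
-- def find_conflict_groups(words, max_prefix_length=5):
--     """Find groups of words that conflict within the given prefix length."""
--     conflict_groups = {}
--     rest = list(words)
--     while rest:
--         prefix = rest[0][:max_prefix_length]
--         group = [w for w in rest if w[:max_prefix_length] == prefix]
--         rest = [w for w in rest if w[:max_prefix_length] != prefix]
--         if len(group) > 1:
--             conflict_groups[prefix] = group
--     return conflict_groups
-- ===== Notes on version B (the rewrite author's own statement) =====
-- stated objective: alternative
-- what changed: B uses no dictionary grouping at all: it repeatedly takes the first remaining word's prefix, extracts that whole group from the remaining list by a scan, and recurses on the residue, emitting a group only when it has more than one word; A builds every prefix bucket in one hashed pass and then filters.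
import Mathlib
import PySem

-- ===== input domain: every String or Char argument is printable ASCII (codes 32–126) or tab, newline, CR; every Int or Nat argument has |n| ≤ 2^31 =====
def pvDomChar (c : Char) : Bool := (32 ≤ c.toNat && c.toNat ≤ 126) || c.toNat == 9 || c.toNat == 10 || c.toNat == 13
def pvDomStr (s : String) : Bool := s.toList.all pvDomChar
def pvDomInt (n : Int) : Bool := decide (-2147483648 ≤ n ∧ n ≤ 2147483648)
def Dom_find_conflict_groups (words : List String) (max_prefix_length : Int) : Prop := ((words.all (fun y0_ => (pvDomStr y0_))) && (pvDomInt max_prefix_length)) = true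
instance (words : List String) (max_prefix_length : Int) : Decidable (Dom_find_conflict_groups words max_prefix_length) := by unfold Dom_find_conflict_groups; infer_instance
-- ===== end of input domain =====

-- B drops the dictionary grouping entirely: a partition loop that repeatedly extracts the
-- whole group of the first remaining word's prefix and recurses on the residue
-- (objective: alternative — same result, different algorithm, not claimed faster).

-- ===== PORT A =====
-- A: defaultdict(list) grouping every word under its prefix, then a dict
-- comprehension keeping only the groups with more than one word.
def find_conflict_groups (words : List String) (max_prefix_length : Int) : List (String × List String) :=
  let prefix_to_words : PySem.Dict String (List String) :=
    words.foldl
      (fun d word => d.modify (PySem.Str.slice word none (some max_prefix_length)) [] (· ++ [word]))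
      PySem.Dict.empty
  let conflict_groups : PySem.Dict String (List String) :=
    prefix_to_words.items.foldl
      (fun d p => if 1 < p.2.length then d.insert p.1 p.2 else d)
      PySem.Dict.empty
  conflict_groups.items

-- ===== PORT B =====
-- B's while loop: take the first remaining word's prefix, comprehend its group and the
-- residue out of `rest`, insert the group if it conflicts, continue on the residue.
def find_conflict_groups_altLoop (max_prefix_length : Int) (rest : List String)
    (conflict_groups : PySem.Dict String (List String)) : PySem.Dict String (List String) :=
  match rest with
  | [] => conflict_groups
  | w :: t =>
    let pfx := PySem.Str.slice w none (some max_prefix_length)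
    let group := (w :: t).filter (fun x => PySem.Str.slice x none (some max_prefix_length) == pfx)
    let rest' := (w :: t).filter (fun x => !(PySem.Str.slice x none (some max_prefix_length) == pfx))
    find_conflict_groups_altLoop max_prefix_length rest'
      (if 1 < group.length then conflict_groups.insert pfx group else conflict_groups)
termination_by rest.length
decreasing_by
  exact Nat.lt_succ_of_le (by
    rw [List.filter_cons_of_neg]
    · exact List.length_filter_le _ t
    · simp)

def find_conflict_groups_alt (words : List String) (max_prefix_length : Int) : List (String × List String) :=
  (find_conflict_groups_altLoop max_prefix_length words PySem.Dict.empty).items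

-- ===== PRECONDITION & SPEC =====
def Spec_find_conflict_groups (words : List String) (max_prefix_length : Int) (out : List (String × List String)) : Prop := out = find_conflict_groups_alt words max_prefix_length
instance (words : List String) (max_prefix_length : Int) (out : List (String × List String)) : Decidable (Spec_find_conflict_groups words max_prefix_length out) := by unfold Spec_find_conflict_groups; infer_instance

-- ===== CLAIM (what is proved, stated in full; the proofs are below) =====
def Claim_equal_find_conflict_groups : Prop := ∀ (words : List String) (max_prefix_length : Int), Dom_find_conflict_groups words max_prefix_length → Spec_find_conflict_groups words max_prefix_length (find_conflict_groups words max_prefix_length)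

-- ===== LEMMAS AND PROOFS =====

-- Proof-side pure version of B's loop (key function generalised): the list of
-- conflicting (key, group) pairs the partition loop emits.
def fcgPure (f : String → String) (rest : List String) : List (String × List String) :=
  match rest with
  | [] => []
  | w :: t =>
    (if 1 < ((w :: t).filter (fun x => f x == f w)).length
      then [(f w, (w :: t).filter (fun x => f x == f w))] else [])
      ++ fcgPure f ((w :: t).filter (fun x => !(f x == f w)))
termination_by rest.length
decreasing_by
  exact Nat.lt_succ_of_le (by
    rw [List.filter_cons_of_neg]
    · exact List.length_filter_le _ t
    · simp)

-- A fold that skips elements failing a test is the fold over the filtered list.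
theorem foldl_if_eq_foldl_filter {α β : Type} (l : List α) (c : α → Prop) [DecidablePred c]
    (g : β → α → β) (init : β) :
    l.foldl (fun d x => if c x then g d x else d) init
      = (l.filter (fun x => decide (c x))).foldl g init := by
  induction l generalizing init with
  | nil => rfl
  | cons x xs ih =>
    by_cases h : c x <;> simp [h, ih]

-- A conditional-insert fold over pairs with distinct keys (fresh for the empty dict)
-- returns exactly the pairs passing the test, in order.
theorem items_foldl_if_insert {κ ν : Type} [BEq κ] [LawfulBEq κ] (l : List (κ × ν))
    (c : κ × ν → Prop) [DecidablePred c] (hnd : (l.map Prod.fst).Nodup) :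
    ((l.foldl (fun d p => if c p then d.insert p.1 p.2 else d) PySem.Dict.empty).items)
      = l.filter (fun p => decide (c p)) := by
  rw [foldl_if_eq_foldl_filter]
  have h := PySem.Dict.items_foldl_insert_fresh (l.filter (fun p => decide (c p)))
    Prod.fst Prod.snd PySem.Dict.empty
    (by intro a _; exact PySem.Dict.contains_empty _)
    (hnd.sublist (List.filter_sublist.map Prod.fst))
  simpa using h

-- Python's first-occurrence dedup commutes with filtering.
theorem ofList_filter {α : Type} [BEq α] [LawfulBEq α] (l : List α) (p : α → Bool) :
    PySem.Set.ofList (l.filter p) = (PySem.Set.ofList l).filter p := by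
  induction l with
  | nil => rfl
  | cons x xs ih =>
    by_cases h : p x = true
    · rw [List.filter_cons_of_pos h, PySem.Set.ofList_cons, PySem.Set.ofList_cons, ih]
      simp only [PySem.Set.discard, List.filter_cons_of_pos h, List.filter_filter]
      congr 1
      exact List.filter_congr (fun y _ => by rw [Bool.and_comm])
    · rw [List.filter_cons_of_neg h, PySem.Set.ofList_cons, ih]
      simp only [PySem.Set.discard, List.filter_cons_of_neg h, List.filter_filter]
      refine (List.filter_congr (fun y _ => ?_)).symm
      by_cases hy : y = x
      · subst hy; simp [h]
      · simp [hy]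

-- The grouping loop 'for w in ws: d[f(w)].append(w)' (defaultdict) characterised:
-- its items are the distinct keys in first-occurrence order, each with the sublist
-- of ws mapping to it.
theorem items_groupby {α κ : Type} [BEq κ] [LawfulBEq κ] (f : α → κ) (ws : List α) :
    (ws.foldl (fun d w => d.modify (f w) [] (· ++ [w])) PySem.Dict.empty).items
      = (PySem.Set.ofList (ws.map f)).map (fun k => (k, ws.filter (fun w => f w == k))) := by
  set d : PySem.Dict κ (List α) :=
    ws.foldl (fun d w => d.modify (f w) [] (· ++ [w])) PySem.Dict.empty with hd
  have hkeys : d.keys = PySem.Set.ofList (ws.map f) := by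
    rw [hd, PySem.Dict.keys_foldl_modify_key ws f [] (fun _ w => (· ++ [w]))]
    simp [PySem.Set.update_nil_left]
  have hnd : d.keys.Nodup := by rw [hkeys]; exact PySem.Set.nodup_ofList _
  have hget : ∀ k, d.getD k [] = ws.filter (fun w => f w == k) := by
    intro k
    have h := PySem.Dict.getD_foldl_modify_append
      (ws.map (fun w => ((f w, w) : κ × α))) PySem.Dict.empty k
    rw [List.foldl_map, List.filter_map] at h
    simpa [Function.comp_def] using h
  rw [PySem.Dict.items_eq_map_keys d hnd ([] : List α), hkeys]
  exact List.map_congr_left (fun k _ => by rw [hget])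

-- B's loop appends its emitted pairs to the accumulator, provided their keys are fresh.
theorem altLoop_items (mpl : Int) : ∀ (n : Nat) (rest : List String), rest.length ≤ n →
    ∀ (d : PySem.Dict String (List String)),
    (∀ w ∈ rest, d.contains (PySem.Str.slice w none (some mpl)) = false) →
    (find_conflict_groups_altLoop mpl rest d).items
      = d.items ++ fcgPure (fun w => PySem.Str.slice w none (some mpl)) rest := by
  intro n
  induction n with
  | zero =>
    intro rest hlen d _
    rw [List.length_eq_zero_iff.mp (Nat.le_zero.mp hlen)]
    rw [find_conflict_groups_altLoop, fcgPure]
    simp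
  | succ n ih =>
    intro rest hlen d hfresh
    match rest with
    | [] => rw [find_conflict_groups_altLoop, fcgPure]; simp
    | w :: t =>
      rw [find_conflict_groups_altLoop, fcgPure]
      set pfx := PySem.Str.slice w none (some mpl) with hpfx
      set p : String → Bool := fun x => PySem.Str.slice x none (some mpl) == pfx with hp
      have hpw : p w = true := by simp [hp, hpfx]
      have hrest' : (w :: t).filter (fun x => !(p x)) = t.filter (fun x => !(p x)) := by
        rw [List.filter_cons_of_neg (by simp [hpw])]
      set group := (w :: t).filter p with hgroup
      set d' := if 1 < group.length then d.insert pfx group else d with hd'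
      have hfresh' : ∀ x ∈ (w :: t).filter (fun x => !(p x)),
          d'.contains (PySem.Str.slice x none (some mpl)) = false := by
        intro x hx
        obtain ⟨hxmem, hxp⟩ := List.mem_filter.mp hx
        have hne : PySem.Str.slice x none (some mpl) ≠ pfx := by
          intro hEq
          rw [hp] at hxp
          simp [hEq] at hxp
        rw [hd']
        split
        · rw [PySem.Dict.contains_insert]
          simp [hne, hfresh x hxmem]
        · exact hfresh x hxmem
      have hlen' : ((w :: t).filter (fun x => !(p x))).length ≤ n := by
        rw [hrest']
        exact le_trans (List.length_filter_le _ t) (Nat.succ_le_succ_iff.mp hlen)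
      rw [ih _ hlen' d' hfresh']
      have hitems : d'.items = d.items ++ (if 1 < group.length then [(pfx, group)] else []) := by
        rw [hd']
        split
        · rw [PySem.Dict.items_insert_of_not_contains d group (hfresh w (by simp))]
        · simp
      rw [hitems, List.append_assoc]

-- fcgPure computes exactly A's characterisation: the distinct keys in
-- first-occurrence order, each with its group, groups of size > 1 only.
theorem fcgPure_eq (f : String → String) : ∀ (n : Nat) (ws : List String), ws.length ≤ n →
    fcgPure f ws
      = ((PySem.Set.ofList (ws.map f)).map
          (fun k => (k, ws.filter (fun w => f w == k)))).filter
          (fun q => decide (1 < q.2.length)) := by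
  intro n
  induction n with
  | zero =>
    intro ws hlen
    rw [List.length_eq_zero_iff.mp (Nat.le_zero.mp hlen)]
    rw [fcgPure]
    simp
  | succ n ih =>
    intro ws hlen
    match ws with
    | [] => rw [fcgPure]; simp
    | w :: t =>
      rw [fcgPure]
      set pfx := f w with hpfx
      set p : String → Bool := fun x => f x == pfx with hp
      have hpw : p w = true := by simp [hp, hpfx]
      set rest' := (w :: t).filter (fun x => !(p x)) with hrest'
      have hrest't : rest' = t.filter (fun x => !(p x)) := by
        rw [hrest', List.filter_cons_of_neg (by simp [hpw])]
      have hlen' : rest'.length ≤ n := by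
        rw [hrest't]
        exact le_trans (List.length_filter_le _ t) (Nat.succ_le_succ_iff.mp hlen)
      rw [ih rest' hlen']
      -- distinct keys of rest' = those of ws with pfx removed
      have hmapf : rest'.map f = (t.map f).filter (fun k => !(k == pfx)) := by
        rw [hrest't, List.filter_map]
        exact congrArg _ (List.filter_congr (fun x _ => by simp [hp]))
      have hsetrest : PySem.Set.ofList (rest'.map f)
          = (PySem.Set.ofList (t.map f)).filter (fun k => !(k == pfx)) := by
        rw [hmapf, ofList_filter]
      -- groups keyed by k ≠ pfx are untouched by removing the pfx-group
      have hfilters : ∀ k : String, k ≠ pfx →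
          rest'.filter (fun x => f x == k) = (w :: t).filter (fun x => f x == k) := by
        intro k hk
        rw [hrest', List.filter_filter]
        refine List.filter_congr (fun x _ => ?_)
        by_cases hx : f x = k
        · have hpxf : p x = false := by rw [hp]; simp [hx, hk]
          simp [hpxf, hx]
        · simp [hx]
      rw [hsetrest]
      -- right-hand side: peel off the head key pfx
      have hcons : PySem.Set.ofList ((w :: t).map f)
          = pfx :: PySem.Set.discard (PySem.Set.ofList (t.map f)) pfx := by
        rw [show (w :: t).map f = f w :: t.map f from rfl, PySem.Set.ofList_cons, ← hpfx]
      rw [hcons, List.map_cons, List.filter_cons]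
      simp only [PySem.Set.discard]
      -- tails agree pointwise
      have htail : ((PySem.Set.ofList (t.map f)).filter (fun k => !(k == pfx))).map
            (fun k => (k, (w :: t).filter (fun x => f x == k)))
          = ((PySem.Set.ofList (t.map f)).filter (fun k => !(k == pfx))).map
            (fun k => (k, rest'.filter (fun x => f x == k))) := by
        refine List.map_congr_left (fun k hk => ?_)
        have hkne : k ≠ pfx := by simpa using (List.mem_filter.mp hk).2
        rw [hfilters k hkne]
      rw [htail]
      -- heads agree: both keep the pfx-group exactly when it conflicts
      rw [if_pos hpw]
      by_cases hc : 1 < (w :: List.filter p t).length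
      · rw [if_pos hc]
        simp only [List.filter_cons, decide_eq_true_eq]
        rw [if_pos hc]
        rfl
      · rw [if_neg hc]
        simp only [List.filter_cons, decide_eq_true_eq]
        rw [if_neg hc]
        simp

-- ===== VERDICT (by name: the statement is the Claim_ definition above) =====
theorem find_conflict_groups_spec : Claim_equal_find_conflict_groups := by
  intro words mpl _
  show find_conflict_groups words mpl = find_conflict_groups_alt words mpl
  unfold find_conflict_groups find_conflict_groups_alt
  simp only []
  set f : String → String := fun w => PySem.Str.slice w none (some mpl) with hf
  have hndA : ((PySem.Set.ofList (words.map f)).map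
      (fun k => (k, words.filter (fun w => f w == k)))).map Prod.fst |>.Nodup := by
    simp [List.map_map, Function.comp_def]
  rw [items_groupby f words, items_foldl_if_insert _ _ hndA, List.filter_map,
    altLoop_items mpl words.length words le_rfl PySem.Dict.empty
      (fun w _ => PySem.Dict.contains_empty _),
    fcgPure_eq f words.length words le_rfl]
  simp [List.filter_map, PySem.Dict.empty]
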